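-- pv_equiv track=rewrite | github.com/claha/advent-of-code | 2023/12/solve.py | get_current_condition
-- ===== SOURCE A (Python) =====
-- OPERATIONAL = "."
--
-- DAMAGED = "#"
--
-- UNKNOWN = "?"
--
-- def get_current_condition(record):
--     """Get current condition."""
--     record = "".join(record).split(OPERATIONAL)
--     condition = []
--     unknown = []
--     for spring in record:
--         d = spring.count(DAMAGED)
--         u = spring.count(UNKNOWN)
--         if d or u:
--             condition.append(d)
--             unknown.append(u)
--     return condition, unknown
-- ===== SOURCE B (Python) =====
-- OPERATIONAL = "."
-- DAMAGED = "#"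
-- UNKNOWN = "?"
--
--
-- def get_current_condition(record):
--     """Get current condition (single character-level scan, no split/count phases)."""
--     condition = []
--     unknown = []
--     d = 0
--     u = 0
--     for ch in "".join(record):
--         if ch == OPERATIONAL:
--             if d or u:
--                 condition.append(d)
--                 unknown.append(u)
--             d = 0
--             u = 0
--         elif ch == DAMAGED:
--             d += 1
--         elif ch == UNKNOWN:
--             u += 1
--     if d or u:
--         condition.append(d)
--         unknown.append(u)
--     return condition, unknown
-- ===== Notes on version B (the rewrite author's own statement) =====
-- stated objective: alternative
-- what changed: Replaced the split-into-segments pass plus two per-segment count passes with a single character-level scan keeping running '#' and '?' counters that flush on '.'.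
import Mathlib
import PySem

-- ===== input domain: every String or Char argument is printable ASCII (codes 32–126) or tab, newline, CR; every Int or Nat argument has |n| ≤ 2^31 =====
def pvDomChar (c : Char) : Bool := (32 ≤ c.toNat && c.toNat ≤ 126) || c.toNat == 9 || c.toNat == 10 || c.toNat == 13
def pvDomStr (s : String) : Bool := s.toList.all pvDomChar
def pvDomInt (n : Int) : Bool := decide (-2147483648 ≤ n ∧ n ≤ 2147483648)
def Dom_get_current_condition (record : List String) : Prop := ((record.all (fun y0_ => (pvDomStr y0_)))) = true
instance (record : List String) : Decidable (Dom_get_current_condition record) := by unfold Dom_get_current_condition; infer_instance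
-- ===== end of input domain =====

-- B replaces A's split + two per-segment count passes by a single character-level scan with running counters (alternative decomposition, same asymptotic cost).


-- ===== PORT A =====
def get_current_condition (record : List String) : List Int × List Int :=
  -- record = "".join(record).split(".")
  let record' := PySem.Chars.splitOn (PySem.Chars.join [] (record.map String.toList)) ['.']
  -- for spring in record: d = spring.count('#'); u = spring.count('?'); if d or u: append
  record'.foldl (fun acc spring =>
    let d : Int := (PySem.Chars.count spring ['#'] : Nat)
    let u : Int := (PySem.Chars.count spring ['?'] : Nat)
    if d ≠ 0 ∨ u ≠ 0 then (acc.1 ++ [d], acc.2 ++ [u]) else acc) ([], [])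

-- ===== PORT B =====
-- one scan step of Source B's loop body
def gccStep (st : List Int × List Int × Int × Int) (ch : Char) : List Int × List Int × Int × Int :=
  let (cond, unk, d, u) := st
  if ch = '.' then
    if d ≠ 0 ∨ u ≠ 0 then (cond ++ [d], unk ++ [u], 0, 0) else (cond, unk, 0, 0)
  else if ch = '#' then (cond, unk, d + 1, u)
  else if ch = '?' then (cond, unk, d, u + 1)
  else (cond, unk, d, u)

-- the trailing 'if d or u: append' after Source B's loop
def gccFlush (st : List Int × List Int × Int × Int) : List Int × List Int :=
  let (cond, unk, d, u) := st
  if d ≠ 0 ∨ u ≠ 0 then (cond ++ [d], unk ++ [u]) else (cond, unk)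

def get_current_condition_alt (record : List String) : List Int × List Int :=
  gccFlush ((PySem.Chars.join [] (record.map String.toList)).foldl gccStep ([], [], 0, 0))

-- ===== PRECONDITION & SPEC =====
def Spec_get_current_condition (record : List String) (out : List Int × List Int) : Prop := out = get_current_condition_alt record
instance (record : List String) (out : List Int × List Int) : Decidable (Spec_get_current_condition record out) := by unfold Spec_get_current_condition; infer_instance

-- ===== CLAIM (what is proved, stated in full; the proofs are below) =====
def Claim_equal_get_current_condition : Prop := ∀ (record : List String), Dom_get_current_condition record → Spec_get_current_condition record (get_current_condition record)

-- ===== LEMMAS AND PROOFS =====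

-- split on one separator char, as plain structural recursion: (first segment, remaining segments)
def msplit (c : Char) : List Char → List Char × List (List Char)
  | [] => ([], [])
  | x :: xs =>
    let p := msplit c xs
    if x = c then ([], p.1 :: p.2) else (x :: p.1, p.2)

theorem count_go_single (c : Char) :
    ∀ (l : List Char) (fuel : Nat) (acc : Nat), l.length ≤ fuel →
      PySem.Chars.count.go [c] fuel l acc = acc + l.count c := by
  intro l
  induction l with
  | nil => intro fuel acc h; cases fuel <;> simp [PySem.Chars.count.go]
  | cons x xs ih =>
    intro fuel acc h
    cases fuel with
    | zero => simp at h
    | succ f =>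
      simp only [PySem.Chars.count.go]
      by_cases hx : c = x
      · subst hx
        simp only [List.isPrefixOf, BEq.rfl, Bool.and_true, if_true]
        rw [show [c].length = 1 from rfl, List.drop_succ_cons, List.drop_zero,
          ih f (acc + 1) (by simpa using h)]
        simp
        omega
      · have : ([c].isPrefixOf (x :: xs)) = false := by
          simp [List.isPrefixOf]; exact hx
        rw [this]
        simp only [Bool.false_eq_true, if_false]
        rw [ih f acc (by simpa using h)]
        simp [(Ne.symm hx)]

theorem count_single (c : Char) (l : List Char) :
    PySem.Chars.count l [c] = l.count c := by
  simp [PySem.Chars.count]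
  simpa using count_go_single c l l.length 0 le_rfl

theorem splitOn_go_single (c : Char) :
    ∀ (l : List Char) (fuel : Nat) (cur : List Char) (acc : List (List Char)), l.length ≤ fuel →
      PySem.Chars.splitOn.go [c] fuel l cur acc =
        acc.reverse ++ (cur.reverse ++ (msplit c l).1) :: (msplit c l).2 := by
  intro l
  induction l with
  | nil => intro fuel cur acc h; cases fuel <;> simp [PySem.Chars.splitOn.go, msplit]
  | cons x xs ih =>
    intro fuel cur acc h
    cases fuel with
    | zero => simp at h
    | succ f =>
      simp only [PySem.Chars.splitOn.go]
      by_cases hx : c = x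
      · subst hx
        simp only [List.isPrefixOf, BEq.rfl, Bool.and_true, if_true]
        rw [show [c].length = 1 from rfl, List.drop_succ_cons, List.drop_zero,
          ih f [] (cur.reverse :: acc) (by simpa using h)]
        simp [msplit]
      · have : ([c].isPrefixOf (x :: xs)) = false := by
          simp [List.isPrefixOf]; exact hx
        rw [this]
        simp only [Bool.false_eq_true, if_false]
        rw [ih f (x :: cur) acc (by simpa using h)]
        simp [msplit, (Ne.symm hx)]

theorem splitOn_single (c : Char) (l : List Char) :
    PySem.Chars.splitOn l [c] = (msplit c l).1 :: (msplit c l).2 := by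
  simpa using splitOn_go_single c l (l.length + 1) [] [] (by omega)

-- A's loop body, with plain List.count
def gccAStep (acc : List Int × List Int) (spring : List Char) : List Int × List Int :=
  let d : Int := (spring.count '#' : Nat)
  let u : Int := (spring.count '?' : Nat)
  if d ≠ 0 ∨ u ≠ 0 then (acc.1 ++ [d], acc.2 ++ [u]) else acc

-- the central invariant: scanning cs with pending counters d, u equals flushing the first
-- msplit-segment (with d, u added) and then running A's loop on the remaining segments
theorem scan_eq_fold (cs : List Char) :
    ∀ (cond unk : List Int) (d u : Int),
      gccFlush (cs.foldl gccStep (cond, unk, d, u)) =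
        ((msplit '.' cs).2).foldl gccAStep
          (if d + ((msplit '.' cs).1.count '#' : Nat) ≠ 0 ∨ u + ((msplit '.' cs).1.count '?' : Nat) ≠ 0
           then (cond ++ [d + ((msplit '.' cs).1.count '#' : Nat)],
                 unk ++ [u + ((msplit '.' cs).1.count '?' : Nat)])
           else (cond, unk)) := by
  induction cs with
  | nil => intro cond unk d u; simp [msplit, gccFlush]
  | cons x xs ih =>
    intro cond unk d u
    by_cases hdot : x = '.'
    · subst hdot
      simp only [List.foldl_cons, gccStep, if_true, msplit]
      by_cases hflush : d ≠ 0 ∨ u ≠ 0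
      · rw [if_pos hflush, ih]; simp [hflush, gccAStep]
      · rw [if_neg hflush, ih]; simp [hflush, gccAStep]
    · by_cases hd : x = '#'
      · subst hd
        simp only [List.foldl_cons, gccStep, msplit, if_neg (by decide : ¬ ('#' : Char) = '.'), if_true]
        rw [ih]
        have e1 : (('#' : Char) == '#') = true := by decide
        have e2 : (('#' : Char) == '?') = false := by decide
        simp only [List.count_cons, e1, e2, if_true, Bool.false_eq_true, if_false, Nat.add_zero]
        have h1 : d + 1 + (((msplit '.' xs).1.count '#' : Nat) : Int)
            = d + (((msplit '.' xs).1.count '#' + 1 : Nat) : Int) := by push_cast; ring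
        rw [h1]
      · by_cases hu : x = '?'
        · subst hu
          simp only [List.foldl_cons, gccStep, msplit,
            if_neg (by decide : ¬ ('?' : Char) = '.'), if_neg (by decide : ¬ ('?' : Char) = '#'), if_true]
          rw [ih]
          have e1 : (('?' : Char) == '#') = false := by decide
          have e2 : (('?' : Char) == '?') = true := by decide
          simp only [List.count_cons, e1, e2, if_true, Bool.false_eq_true, if_false, Nat.add_zero]
          have h1 : u + 1 + (((msplit '.' xs).1.count '?' : Nat) : Int)
              = u + (((msplit '.' xs).1.count '?' + 1 : Nat) : Int) := by push_cast; ring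
          rw [h1]
        · simp only [List.foldl_cons, gccStep, msplit, if_neg hdot, if_neg hd, if_neg hu]
          rw [ih]
          simp [hd, hu]

-- ===== VERDICT (by name: the statement is the Claim_ definition above) =====
theorem get_current_condition_spec : Claim_equal_get_current_condition := by
  intro record _
  unfold Spec_get_current_condition get_current_condition get_current_condition_alt
  set cs := PySem.Chars.join [] (record.map String.toList) with hcs
  rw [splitOn_single]
  have hstep : (fun (acc : List Int × List Int) (spring : List Char) =>
      let d : Int := (PySem.Chars.count spring ['#'] : Nat)
      let u : Int := (PySem.Chars.count spring ['?'] : Nat)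
      if d ≠ 0 ∨ u ≠ 0 then (acc.1 ++ [d], acc.2 ++ [u]) else acc) = gccAStep := by
    funext acc spring
    simp [gccAStep, count_single]
  rw [hstep]
  have := scan_eq_fold cs [] [] 0 0
  simp only [zero_add] at this
  rw [this]
  simp [gccAStep, List.foldl_cons]
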